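-- pv_equiv track=rewrite | github.com/box-lin/PyIsTheBestLang | src/greedy/brain_storming/problem.py | lc_1927
-- ===== SOURCE A (Python) =====
-- def lc_1927(num: str) -> bool:
--     """
--     url: https://leetcode.cn/problems/sum-game/description/
--     tag: game_dp|brain_teaser|classification_discussion
--     """
--
--     # 博弈brain_teaser|classification_discussion
--     def check(s):
--         res = 0
--         cnt = 0
--         for w in s:
--             if w.isnumeric():
--                 res += int(w)
--             else:
--                 cnt += 1
--         return [res, cnt]
--
--     # 左右两边的数字和以及问号个数
--     n = len(num)
--     a, x = check(num[:n // 2])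
--     b, y = check(num[n // 2:])
--
--     # Alice把宝压在右边
--     b_add = 9 * (y // 2 + y % 2)
--     if y % 2 == 0:
--         a_add = 9 * (x // 2)
--     else:
--         a_add = 9 * (x // 2 + x % 2)
--     if a + a_add < b + b_add:
--         return True
--
--     # Alice把宝压在左边
--     a_add = 9 * (x // 2 + x % 2)
--     if x % 2 == 0:
--         b_add = 9 * (y // 2)
--     else:
--         b_add = 9 * (y // 2 + y % 2)
--     if b + b_add < a + a_add:
--         return True
--
--     # 左右都不能获胜
--     return False
-- ===== SOURCE B (Python) =====
-- def lc_1927(num: str) -> bool: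
--     # One linear pass; closed-form parity/equation verdict instead of
--     # simulating Alice's two betting strategies.
--     n = len(num)
--     a = x = b = y = 0
--     for i, w in enumerate(num):
--         if w.isnumeric():
--             if i < n // 2:
--                 a += int(w)
--             else:
--                 b += int(w)
--         else:
--             if i < n // 2:
--                 x += 1
--             else:
--                 y += 1
--     if (x + y) % 2 == 1:
--         return True
--     return 2 * (a - b) != 9 * (y - x)
-- ===== Notes on version B (the rewrite author's own statement) =====
-- stated objective: simpler
-- what changed: Replaces A's two-phase simulation of Alice's betting strategies (separate half-string scans plus ceil/floor 9-bonus case analysis) by a single pass over the string and the closed-form verdict: true iff the question-mark count is odd or 2*(leftsum-rightsum) != 9*(rightmarks-leftmarks).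
import Mathlib
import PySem

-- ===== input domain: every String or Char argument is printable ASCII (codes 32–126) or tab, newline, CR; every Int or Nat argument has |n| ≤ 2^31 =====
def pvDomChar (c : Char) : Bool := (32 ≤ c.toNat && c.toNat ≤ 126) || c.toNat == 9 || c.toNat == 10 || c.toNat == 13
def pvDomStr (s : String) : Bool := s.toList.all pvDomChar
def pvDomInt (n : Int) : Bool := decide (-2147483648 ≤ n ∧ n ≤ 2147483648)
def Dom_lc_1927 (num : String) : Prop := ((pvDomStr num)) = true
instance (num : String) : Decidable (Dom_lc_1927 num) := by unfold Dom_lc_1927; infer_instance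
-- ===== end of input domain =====

-- B replaces A's two-scenario betting simulation with one pass and a closed-form
-- parity/equation verdict (objective: simpler).
-- On the ASCII input domain 'w.isnumeric()' holds exactly for '0'..'9' (= PySem.Chars.isdigit),
-- and int(w) for such a w is its digit value; both ports use that, exact on Dom_lc_1927.

-- ===== PORT A =====
-- def check(s): loop 'for w in s' with accumulators res, cnt
def pvCheckGo : List Char → Int → Int → Int × Int
  | [], res, cnt => (res, cnt)
  | w :: s, res, cnt =>
      if PySem.Chars.isdigit w then  -- w.isnumeric(), exact on ASCII
        pvCheckGo s (res + ((w.toNat : Int) - 48)) cnt  -- int(w) for a digit char, exact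
      else
        pvCheckGo s res (cnt + 1)

def pvCheck (s : List Char) : Int × Int := pvCheckGo s 0 0

def lc_1927 (num : String) : Bool :=
  let n : Nat := num.toList.length
  -- num[:n//2] / num[n//2:] — slice_to_natCast/slice_from_natCast with floordiv_natCast, exact
  let ax := pvCheck (num.toList.take (n / 2))
  let by_ := pvCheck (num.toList.drop (n / 2))
  let a := ax.1; let x := ax.2; let b := by_.1; let y := by_.2
  -- Alice bets on the right side
  let b_add₁ := 9 * (PySem.Int.floordiv y 2 + PySem.Int.mod y 2)
  let a_add₁ := if PySem.Int.mod y 2 = 0 then 9 * PySem.Int.floordiv x 2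
                else 9 * (PySem.Int.floordiv x 2 + PySem.Int.mod x 2)
  if a + a_add₁ < b + b_add₁ then true
  else
    -- Alice bets on the left side
    let a_add₂ := 9 * (PySem.Int.floordiv x 2 + PySem.Int.mod x 2)
    let b_add₂ := if PySem.Int.mod x 2 = 0 then 9 * PySem.Int.floordiv y 2
                  else 9 * (PySem.Int.floordiv y 2 + PySem.Int.mod y 2)
    if b + b_add₂ < a + a_add₂ then true else false

-- ===== PORT B =====
-- the single 'for i, w in enumerate(num)' loop, state (a, x, b, y)
def pvAltGo (h : Nat) : Nat → List Char → Int → Int → Int → Int → Int × Int × Int × Int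
  | _, [], a, x, b, y => (a, x, b, y)
  | i, w :: s, a, x, b, y =>
      if PySem.Chars.isdigit w then  -- w.isnumeric(), exact on ASCII
        if i < h then pvAltGo h (i + 1) s (a + ((w.toNat : Int) - 48)) x b y
        else pvAltGo h (i + 1) s a x (b + ((w.toNat : Int) - 48)) y
      else
        if i < h then pvAltGo h (i + 1) s a (x + 1) b y
        else pvAltGo h (i + 1) s a x b (y + 1)

def lc_1927_alt (num : String) : Bool :=
  let n : Nat := num.toList.length
  let st := pvAltGo (n / 2) 0 num.toList 0 0 0 0
  let a := st.1; let x := st.2.1; let b := st.2.2.1; let y := st.2.2.2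
  if PySem.Int.mod (x + y) 2 = 1 then true
  else decide (2 * (a - b) ≠ 9 * (y - x))

-- ===== PRECONDITION & SPEC =====
def Spec_lc_1927 (num : String) (out : Bool) : Prop := out = lc_1927_alt num
instance (num : String) (out : Bool) : Decidable (Spec_lc_1927 num out) := by unfold Spec_lc_1927; infer_instance

-- ===== CLAIM (what is proved, stated in full; the proofs are below) =====
def Claim_equal_lc_1927 : Prop := ∀ (num : String), Dom_lc_1927 num → Spec_lc_1927 num (lc_1927 num)

-- ===== LEMMAS AND PROOFS =====

theorem pvCheckGo_eq (s : List Char) : ∀ (res cnt : Int),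
    pvCheckGo s res cnt = (res + (pvCheck s).1, cnt + (pvCheck s).2) := by
  induction s with
  | nil => intro res cnt; simp [pvCheckGo, pvCheck]
  | cons w s ih =>
      intro res cnt
      simp only [pvCheck, pvCheckGo]
      by_cases hd : PySem.Chars.isdigit w
      · rw [if_pos hd, if_pos hd, ih, ih]
        simp [Prod.mk.injEq, add_assoc, add_comm, add_left_comm]
      · rw [if_neg hd, if_neg hd, ih, ih]
        simp [Prod.mk.injEq, add_assoc, add_comm, add_left_comm]

theorem pvCheck_cons_digit (w : Char) (s : List Char) (hd : PySem.Chars.isdigit w = true) :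
    pvCheck (w :: s) = (((w.toNat : Int) - 48) + (pvCheck s).1, (pvCheck s).2) := by
  simp only [pvCheck, pvCheckGo, if_pos hd]
  rw [pvCheckGo_eq]
  simp [pvCheck, Prod.mk.injEq, add_assoc, add_comm, add_left_comm]

theorem pvCheck_cons_nondigit (w : Char) (s : List Char) (hd : ¬ PySem.Chars.isdigit w = true) :
    pvCheck (w :: s) = ((pvCheck s).1, 1 + (pvCheck s).2) := by
  simp only [pvCheck, pvCheckGo, if_neg hd]
  rw [pvCheckGo_eq]
  simp [pvCheck, Prod.mk.injEq, add_assoc, add_comm, add_left_comm]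

theorem pvAltGo_ge (h : Nat) (s : List Char) : ∀ (i : Nat) (a x b y : Int), h ≤ i →
    pvAltGo h i s a x b y = (a, x, b + (pvCheck s).1, y + (pvCheck s).2) := by
  induction s with
  | nil => intro i a x b y _; simp [pvAltGo, pvCheck, pvCheckGo]
  | cons w s ih =>
      intro i a x b y hi
      have hlt : ¬ i < h := by omega
      simp only [pvAltGo, hlt, if_false]
      by_cases hd : PySem.Chars.isdigit w
      · rw [if_pos hd, ih (i+1) _ _ _ _ (by omega), pvCheck_cons_digit w s hd]
        simp [Prod.mk.injEq, add_assoc, add_comm, add_left_comm]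
      · rw [if_neg hd, ih (i+1) _ _ _ _ (by omega), pvCheck_cons_nondigit w s hd]
        simp [Prod.mk.injEq, add_assoc, add_comm, add_left_comm]

theorem pvAltGo_split (h : Nat) (s : List Char) : ∀ (i : Nat) (a x b y : Int),
    pvAltGo h i s a x b y =
      (a + (pvCheck (s.take (h - i))).1, x + (pvCheck (s.take (h - i))).2,
       b + (pvCheck (s.drop (h - i))).1, y + (pvCheck (s.drop (h - i))).2) := by
  induction s with
  | nil => intro i a x b y; simp [pvAltGo, pvCheck, pvCheckGo]
  | cons w s ih =>
      intro i a x b y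
      by_cases hi : i < h
      · have ht : h - i = (h - (i + 1)) + 1 := by omega
        simp only [pvAltGo, hi, if_true, ht, List.take_succ_cons, List.drop_succ_cons]
        by_cases hd : PySem.Chars.isdigit w
        · rw [if_pos hd, ih, pvCheck_cons_digit w _ hd]
          simp [Prod.mk.injEq, add_assoc, add_comm, add_left_comm]
        · rw [if_neg hd, ih, pvCheck_cons_nondigit w _ hd]
          simp [Prod.mk.injEq, add_assoc, add_comm, add_left_comm]
      · have ht : h - i = 0 := by omega
        rw [ht]
        simp only [List.take_zero, List.drop_zero]
        rw [pvAltGo_ge h (w :: s) i a x b y (by omega)]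
        simp [pvCheck, pvCheckGo]

-- the arithmetic core: A's two-strategy case analysis equals B's parity/equation verdict
theorem pv_decision (a b x y : Int) :
    (if a + (if PySem.Int.mod y 2 = 0 then 9 * PySem.Int.floordiv x 2
             else 9 * (PySem.Int.floordiv x 2 + PySem.Int.mod x 2)) <
        b + 9 * (PySem.Int.floordiv y 2 + PySem.Int.mod y 2) then true
     else if b + (if PySem.Int.mod x 2 = 0 then 9 * PySem.Int.floordiv y 2
                  else 9 * (PySem.Int.floordiv y 2 + PySem.Int.mod y 2)) <
             a + 9 * (PySem.Int.floordiv x 2 + PySem.Int.mod x 2) then true else false) =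
    (if PySem.Int.mod (x + y) 2 = 1 then true
     else decide (2 * (a - b) ≠ 9 * (y - x))) := by
  simp only [PySem.Int.floordiv_eq_ediv_of_pos (show (0:Int) < 2 by omega),
             PySem.Int.mod_eq_emod_of_pos (show (0:Int) < 2 by omega)]
  split_ifs <;> simp_all <;> omega

-- ===== VERDICT (by name: the statement is the Claim_ definition above) =====
theorem lc_1927_spec : Claim_equal_lc_1927 := by
  intro num _
  unfold Spec_lc_1927 lc_1927 lc_1927_alt
  simp only [pvAltGo_split, Nat.sub_zero, zero_add]
  exact pv_decision _ _ _ _
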